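-- pv_equiv track=rewrite | github.com/villanuevajamesfvillanueva/learning-python | barnproblem.py | solve
-- ===== SOURCE A (Python) =====
-- def solve(numLegs, numHeads):
--     soln = []
--     for numSpidies in range(0, numHeads + 1):
--         for numChicks in range(0, numHeads - numSpidies + 1):
--             numPigs = numHeads - numChicks - numSpidies
--             ansLegs = 4*numPigs + 2*numChicks + 8*numSpidies
--             if (ansLegs == numLegs):
--                 soln.append(numPigs)
--                 soln.append(numChicks)
--                 soln.append(numSpidies)
--     return soln
-- ===== SOURCE B (Python) =====
-- def solve(numLegs, numHeads):
--     soln = []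
--     for numSpidies in range(0, numHeads + 1):
--         r = numLegs - 2 * numHeads - 6 * numSpidies
--         if r >= 0 and r % 2 == 0:
--             numPigs = r // 2
--             if numPigs <= numHeads - numSpidies:
--                 soln.extend([numPigs, numHeads - numSpidies - numPigs, numSpidies])
--     return soln
-- ===== Notes on version B (the rewrite author's own statement) =====
-- stated objective: faster
-- what changed: Replaced A's inner brute-force scan over all chicken counts by solving the 2x2 linear system (heads and legs) directly for pigs/chicks per spider count, with a parity/range validity check.
import Mathlib
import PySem

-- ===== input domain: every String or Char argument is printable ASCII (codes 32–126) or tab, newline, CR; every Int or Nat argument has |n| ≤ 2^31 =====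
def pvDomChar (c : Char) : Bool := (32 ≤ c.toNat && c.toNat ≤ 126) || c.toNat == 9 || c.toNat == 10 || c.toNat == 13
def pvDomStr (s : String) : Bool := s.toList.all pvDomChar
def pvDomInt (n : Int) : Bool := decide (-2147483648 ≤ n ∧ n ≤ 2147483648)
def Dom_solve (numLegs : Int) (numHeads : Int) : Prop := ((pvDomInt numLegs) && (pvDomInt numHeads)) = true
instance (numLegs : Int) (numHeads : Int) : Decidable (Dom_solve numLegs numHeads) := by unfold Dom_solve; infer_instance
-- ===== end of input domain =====

-- B replaces A's inner O(H) scan over chicken counts by solving the 2x2 linear system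
-- for pigs/chicks directly per spider count (objective: faster, O(H^2) → O(H)).

-- ===== PORT A =====
def solve (numLegs : Int) (numHeads : Int) : List Int :=
  (PySem.List.pyRange 0 (numHeads + 1) 1).foldl
    (fun soln numSpidies =>
      (PySem.List.pyRange 0 (numHeads - numSpidies + 1) 1).foldl
        (fun soln numChicks =>
          let numPigs := numHeads - numChicks - numSpidies
          let ansLegs := 4 * numPigs + 2 * numChicks + 8 * numSpidies
          if ansLegs = numLegs then soln ++ [numPigs, numChicks, numSpidies] else soln)
        soln)
    []

-- ===== PORT B =====
def solve_alt (numLegs : Int) (numHeads : Int) : List Int :=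
  (PySem.List.pyRange 0 (numHeads + 1) 1).foldl
    (fun soln numSpidies =>
      let r := numLegs - 2 * numHeads - 6 * numSpidies
      if 0 ≤ r ∧ PySem.Int.mod r 2 = 0 then
        let numPigs := PySem.Int.floordiv r 2
        if numPigs ≤ numHeads - numSpidies then
          soln ++ [numPigs, numHeads - numSpidies - numPigs, numSpidies]
        else soln
      else soln)
    []

-- ===== PRECONDITION & SPEC =====
def Spec_solve (numLegs : Int) (numHeads : Int) (out : List Int) : Prop := out = solve_alt numLegs numHeads
instance (numLegs : Int) (numHeads : Int) (out : List Int) : Decidable (Spec_solve numLegs numHeads out) := by unfold Spec_solve; infer_instance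

-- ===== CLAIM (what is proved, stated in full; the proofs are below) =====
def Claim_equal_solve : Prop := ∀ (numLegs : Int) (numHeads : Int), Dom_solve numLegs numHeads → Spec_solve numLegs numHeads (solve numLegs numHeads)

-- ===== LEMMAS AND PROOFS =====

-- the per-spider contribution of B's loop body
def perS (L H s : Int) : List Int :=
  let r := L - 2 * H - 6 * s
  if 0 ≤ r ∧ PySem.Int.mod r 2 = 0 then
    let p := PySem.Int.floordiv r 2
    if p ≤ H - s then [p, H - s - p, s] else []
  else []

-- flatMap of a 'fires at exactly one point' function over a nodup list
theorem flatMap_single (l : List Int) (hl : l.Nodup) (c₀ : Int) (v : Int → List Int) :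
    l.flatMap (fun c => if c = c₀ then v c else []) = if c₀ ∈ l then v c₀ else [] := by
  induction l with
  | nil => simp
  | cons a t ih =>
    rcases List.nodup_cons.mp hl with ⟨ha, ht⟩
    by_cases h : a = c₀
    · subst h
      have : t.flatMap (fun c => if c = a then v c else []) = [] := by
        rw [ih ht, if_neg ha]
      simp [List.flatMap_cons, this]
    · simp [List.flatMap_cons, h, ih ht, Ne.symm h]

-- A's inner loop over chicken counts computes exactly B's per-spider contribution
theorem innerA_eq (L H s : Int) (acc : List Int) :
    (PySem.List.pyRange 0 (H - s + 1) 1).foldl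
      (fun soln numChicks =>
        let numPigs := H - numChicks - s
        let ansLegs := 4 * numPigs + 2 * numChicks + 8 * s
        if ansLegs = L then soln ++ [numPigs, numChicks, s] else soln)
      acc = acc ++ perS L H s := by
  have hstep :
      (PySem.List.pyRange 0 (H - s + 1) 1).foldl
        (fun soln numChicks =>
          let numPigs := H - numChicks - s
          let ansLegs := 4 * numPigs + 2 * numChicks + 8 * s
          if ansLegs = L then soln ++ [numPigs, numChicks, s] else soln)
        acc
      = (PySem.List.pyRange 0 (H - s + 1) 1).foldl
          (fun soln c => soln ++
            (if 4 * (H - c - s) + 2 * c + 8 * s = L then [H - c - s, c, s] else []))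
          acc := by
    apply PySem.List.foldl_congr_mem
    intro a c _
    by_cases h : 4 * (H - c - s) + 2 * c + 8 * s = L <;> simp [h]
  rw [hstep, PySem.List.foldl_append_eq_flatMap]
  congr 1
  by_cases hpar : L % 2 = 0
  · -- L even: the condition fires exactly at c₀
    set c₀ : Int := (4 * H + 4 * s - L) / 2 with hc₀
    have hfun : (fun c => if 4 * (H - c - s) + 2 * c + 8 * s = L then ([H - c - s, c, s] : List Int) else [])
        = fun c => if c = c₀ then [H - c - s, c, s] else [] := by
      funext c
      have : (4 * (H - c - s) + 2 * c + 8 * s = L) ↔ (c = c₀) := by rw [hc₀]; omega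
      by_cases h : c = c₀
      · rw [if_pos (this.mpr h), if_pos h]
      · rw [if_neg (fun hh => h (this.mp hh)), if_neg h]
    rw [hfun, flatMap_single _ (PySem.List.nodup_pyRange_one 0 (H - s + 1)) c₀]
    have hmem : c₀ ∈ PySem.List.pyRange 0 (H - s + 1) 1 ↔ 0 ≤ c₀ ∧ c₀ < H - s + 1 :=
      PySem.List.mem_pyRange_one
    unfold perS
    dsimp only
    rw [PySem.Int.mod_eq_emod_of_pos (by norm_num : (0:Int) < 2),
        PySem.Int.floordiv_eq_ediv_of_pos (by norm_num : (0:Int) < 2)]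
    by_cases hin : 0 ≤ c₀ ∧ c₀ < H - s + 1
    · rw [if_pos (hmem.mpr hin)]
      have h1 : 0 ≤ L - 2 * H - 6 * s ∧ (L - 2 * H - 6 * s) % 2 = 0 := by
        constructor <;> omega
      rw [if_pos h1]
      have hp : (L - 2 * H - 6 * s) / 2 ≤ H - s := by omega
      rw [if_pos hp]
      have e1 : H - c₀ - s = (L - 2 * H - 6 * s) / 2 := by omega
      have e2 : c₀ = H - s - (L - 2 * H - 6 * s) / 2 := by omega
      rw [e1, e2]
    · rw [if_neg (fun h => hin (hmem.mp h))]
      by_cases h1 : 0 ≤ L - 2 * H - 6 * s ∧ (L - 2 * H - 6 * s) % 2 = 0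
      · rw [if_pos h1]
        have hp : ¬ ((L - 2 * H - 6 * s) / 2 ≤ H - s) := by omega
        rw [if_neg hp]
      · rw [if_neg h1]
  · -- L odd: the condition never fires and B's parity test fails too
    have hfun : (fun c => if 4 * (H - c - s) + 2 * c + 8 * s = L then ([H - c - s, c, s] : List Int) else [])
        = fun _ => ([] : List Int) := by
      funext c
      rw [if_neg (by omega)]
    rw [hfun]
    unfold perS
    dsimp only
    rw [PySem.Int.mod_eq_emod_of_pos (by norm_num : (0:Int) < 2)]
    rw [if_neg (by omega : ¬ (0 ≤ L - 2 * H - 6 * s ∧ (L - 2 * H - 6 * s) % 2 = 0))]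
    simp

theorem altB_eq (L H s : Int) (acc : List Int) :
    (fun soln numSpidies =>
      let r := L - 2 * H - 6 * numSpidies
      if 0 ≤ r ∧ PySem.Int.mod r 2 = 0 then
        let numPigs := PySem.Int.floordiv r 2
        if numPigs ≤ H - numSpidies then
          soln ++ [numPigs, H - numSpidies - numPigs, numSpidies]
        else soln
      else soln) acc s = acc ++ perS L H s := by
  unfold perS
  dsimp only
  split_ifs <;> simp

-- ===== VERDICT (by name: the statement is the Claim_ definition above) =====
theorem solve_spec : Claim_equal_solve := by
  intro L H _
  unfold Spec_solve solve solve_alt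
  have hA : ∀ acc, (PySem.List.pyRange 0 (H + 1) 1).foldl
      (fun soln numSpidies =>
        (PySem.List.pyRange 0 (H - numSpidies + 1) 1).foldl
          (fun soln numChicks =>
            let numPigs := H - numChicks - numSpidies
            let ansLegs := 4 * numPigs + 2 * numChicks + 8 * numSpidies
            if ansLegs = L then soln ++ [numPigs, numChicks, numSpidies] else soln)
          soln)
      acc
    = (PySem.List.pyRange 0 (H + 1) 1).foldl (fun soln s => soln ++ perS L H s) acc := by
    intro acc
    apply PySem.List.foldl_congr_mem
    intro a s _
    exact innerA_eq L H s a
  have hB : ∀ acc, (PySem.List.pyRange 0 (H + 1) 1).foldl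
      (fun soln numSpidies =>
        let r := L - 2 * H - 6 * numSpidies
        if 0 ≤ r ∧ PySem.Int.mod r 2 = 0 then
          let numPigs := PySem.Int.floordiv r 2
          if numPigs ≤ H - numSpidies then
            soln ++ [numPigs, H - numSpidies - numPigs, numSpidies]
          else soln
        else soln)
      acc
    = (PySem.List.pyRange 0 (H + 1) 1).foldl (fun soln s => soln ++ perS L H s) acc := by
    intro acc
    apply PySem.List.foldl_congr_mem
    intro a s _
    exact altB_eq L H s a
  rw [hA, hB]
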